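-- pv_equiv track=rewrite | github.com/Srestrero/git_lab_ingesoft | Polinomios como arreglos,43-49.py | lectura_inicial_2
-- ===== SOURCE A (Python) =====
-- def lectura_inicial_2(a,b,c,d):
--     if b==len(a):
--         return d
--     elif b<len(a):
--         if (a[b]=="+"or a[b]=="-")and(c!=""):
--             d.append(c)
--             c=""
--             c+=a[b]
--             return lectura_inicial_2(a,b+1,c,d)
--         if (b+1)==len(a):
--             c+=a[b]
--             d.append(c)
--             return lectura_inicial_2(a,b+1,c,d)
--         else :
--             c+=a[b]
--             return lectura_inicial_2(a,b+1,c,d)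
-- ===== SOURCE B (Python) =====
-- def lectura_inicial_2(a, b, c, d):
--     for i in range(b, len(a)):
--         ch = a[i]
--         if ch in ("+", "-") and c != "":
--             d.append(c)
--             c = ch
--         elif i + 1 == len(a):
--             c += ch
--             d.append(c)
--         else:
--             c += ch
--     return d
-- ===== Notes on version B (the rewrite author's own statement) =====
-- stated objective: simpler
-- what changed: Replaced the tail recursion re-checking b against len(a) each call by a single explicit for-loop over range(b, len(a)) carrying (c, d) as loop state.
-- outside the precondition, e.g. on lectura_inicial_2([], 1, '', []): A returns None, B returns []
import Mathlib
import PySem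

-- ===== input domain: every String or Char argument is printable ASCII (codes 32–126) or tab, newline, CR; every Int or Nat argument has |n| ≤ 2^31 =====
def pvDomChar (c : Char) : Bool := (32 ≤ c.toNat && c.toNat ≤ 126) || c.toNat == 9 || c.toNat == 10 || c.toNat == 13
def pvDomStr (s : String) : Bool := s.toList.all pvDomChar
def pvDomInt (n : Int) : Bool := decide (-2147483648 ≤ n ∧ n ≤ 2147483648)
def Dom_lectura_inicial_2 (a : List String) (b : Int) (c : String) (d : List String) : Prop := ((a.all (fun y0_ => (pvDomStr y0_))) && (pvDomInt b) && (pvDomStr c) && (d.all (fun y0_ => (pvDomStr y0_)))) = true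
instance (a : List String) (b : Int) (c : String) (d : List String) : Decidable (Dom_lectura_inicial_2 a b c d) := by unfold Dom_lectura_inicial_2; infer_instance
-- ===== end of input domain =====

-- B replaces A's tail recursion by a single explicit for-loop over range(b, len(a))
-- carrying (c, d) as loop state (same decomposition, simpler shape; no speed claim).
-- Both A and B append to d in place in Python; they perform the identical appends,
-- and the equivalence proved here is about the return value.

-- ===== PORT A =====
def lectura_inicial_2 (a : List String) (b : Int) (c : String) (d : List String) : List String :=
  if b = (a.length : Int) then d
  else if b < (a.length : Int) then
    match PySem.List.pyGet? a b with
    | none => d  -- Python raises IndexError here; outside Pre_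
    | some ab =>
      if (ab = "+" ∨ ab = "-") ∧ c ≠ "" then
        lectura_inicial_2 a (b + 1) ab (d ++ [c])
      else if b + 1 = (a.length : Int) then
        lectura_inicial_2 a (b + 1) (c ++ ab) (d ++ [c ++ ab])
      else
        lectura_inicial_2 a (b + 1) (c ++ ab) d
  else d  -- Python falls off the function and returns None here; outside Pre_
termination_by (↑a.length - b).toNat
decreasing_by all_goals omega

-- ===== PORT B =====
-- loop body of Source B's for-loop: state is (c, d), i the loop index
def pvStepB (a : List String) (cd : String × List String) (i : Int) : String × List String :=
  match PySem.List.pyGet? a i with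
  | none => cd  -- Python raises IndexError here; outside Pre_
  | some ch =>
    if (ch = "+" ∨ ch = "-") ∧ cd.1 ≠ "" then (ch, cd.2 ++ [cd.1])
    else if i + 1 = (a.length : Int) then (cd.1 ++ ch, cd.2 ++ [cd.1 ++ ch])
    else (cd.1 ++ ch, cd.2)

def lectura_inicial_2_alt (a : List String) (b : Int) (c : String) (d : List String) : List String :=
  ((PySem.List.pyRange b (a.length : Int) 1).foldl (pvStepB a) (c, d)).2

-- ===== PRECONDITION & SPEC =====
-- Pre_ excludes b > len(a), where Python A returns None (not a list), and
-- b < -len(a), where Python A raises IndexError on a[b].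
def Pre_lectura_inicial_2 (a : List String) (b : Int) (c : String) (d : List String) : Prop :=
  -(a.length : Int) ≤ b ∧ b ≤ (a.length : Int)
instance (a : List String) (b : Int) (c : String) (d : List String) : Decidable (Pre_lectura_inicial_2 a b c d) := by unfold Pre_lectura_inicial_2; infer_instance
def pvWitness_lectura_inicial_2 : List String × Int × String × List String := (["3", "x", "+", "5"], 0, "", [])

def Spec_lectura_inicial_2 (a : List String) (b : Int) (c : String) (d : List String) (out : List String) : Prop := out = lectura_inicial_2_alt a b c d
instance (a : List String) (b : Int) (c : String) (d : List String) (out : List String) : Decidable (Spec_lectura_inicial_2 a b c d out) := by unfold Spec_lectura_inicial_2; infer_instance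

-- ===== CLAIM (what is proved, stated in full; the proofs are below) =====
def Claim_equal_lectura_inicial_2 : Prop := ∀ (a : List String) (b : Int) (c : String) (d : List String), Dom_lectura_inicial_2 a b c d → Pre_lectura_inicial_2 a b c d → Spec_lectura_inicial_2 a b c d (lectura_inicial_2 a b c d)

-- ===== LEMMAS AND PROOFS =====
theorem lectura_eq_foldl (a : List String) :
    ∀ (n : Nat) (b : Int), (↑a.length - b).toNat = n → -(a.length : Int) ≤ b → b ≤ (a.length : Int) →
    ∀ (c : String) (d : List String),
      lectura_inicial_2 a b c d = ((PySem.List.pyRange b (a.length : Int) 1).foldl (pvStepB a) (c, d)).2 := by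
  intro n
  induction n with
  | zero =>
    intro b hn h1 h2 c d
    have hb : b = (a.length : Int) := by omega
    rw [lectura_inicial_2, PySem.List.pyRange_one_eq_nil (by omega)]
    simp [hb]
  | succ n ih =>
    intro b hn h1 h2 c d
    have hb : b < (a.length : Int) := by omega
    rw [PySem.List.pyRange_one_cons hb, List.foldl_cons]
    rw [lectura_inicial_2]
    have hbne : ¬ b = (a.length : Int) := by omega
    simp only [hbne, if_false, hb, if_true]
    cases hget : PySem.List.pyGet? a b with
    | none =>
      exfalso
      rw [PySem.List.pyGet?_eq_none_iff] at hget
      exact hget ⟨h1, hb⟩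
    | some ab =>
      rw [pvStepB, hget]
      dsimp only
      by_cases hsign : (ab = "+" ∨ ab = "-") ∧ c ≠ ""
      · simp only [if_pos hsign]
        exact ih (b + 1) (by omega) (by omega) (by omega) ab (d ++ [c])
      · simp only [if_neg hsign]
        by_cases hlast : b + 1 = (a.length : Int)
        · simp only [if_pos hlast]
          exact ih (b + 1) (by omega) (by omega) (by omega) (c ++ ab) (d ++ [c ++ ab])
        · simp only [if_neg hlast]
          exact ih (b + 1) (by omega) (by omega) (by omega) (c ++ ab) d

-- ===== VERDICT (by name: the statement is the Claim_ definition above) =====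
theorem lectura_inicial_2_spec : Claim_equal_lectura_inicial_2 := by
  intro a b c d _ hpre
  exact lectura_eq_foldl a (↑a.length - b).toNat b rfl hpre.1 hpre.2 c d
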